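-- pv_equiv track=rewrite | github.com/victorhob1981/football-analytics | api/src/routers/competition_hub.py | _resolve_team_journey_final_outcome
-- ===== SOURCE A (Python) =====
-- from typing import Any
--
-- def _resolve_team_journey_final_outcome(stages: list[dict[str, Any]]) -> str:
--     if any(stage["stageResult"] == "champion" for stage in stages):
--         return "champion"
--     if any(stage["stageResult"] == "runner_up" for stage in stages):
--         return "runner_up"
--     if stages:
--         return stages[-1]["stageResult"]
--     return "not_applicable"
-- ===== SOURCE B (Python) =====
-- def _resolve_team_journey_final_outcome(stages):
--     runner_up_seen = False
--     last = "not_applicable"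
--     for stage in stages:
--         last = stage["stageResult"]
--         if last == "champion":
--             return "champion"
--         if last == "runner_up":
--             runner_up_seen = True
--     return "runner_up" if runner_up_seen else last
-- ===== Notes on version B (the rewrite author's own statement) =====
-- stated objective: simpler
-- what changed: Replaces A's two separate any-scans plus a trailing stages[-1] access by one single pass that returns on the first champion and otherwise tracks a runner_up flag and the last stage's result.
import Mathlib
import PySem

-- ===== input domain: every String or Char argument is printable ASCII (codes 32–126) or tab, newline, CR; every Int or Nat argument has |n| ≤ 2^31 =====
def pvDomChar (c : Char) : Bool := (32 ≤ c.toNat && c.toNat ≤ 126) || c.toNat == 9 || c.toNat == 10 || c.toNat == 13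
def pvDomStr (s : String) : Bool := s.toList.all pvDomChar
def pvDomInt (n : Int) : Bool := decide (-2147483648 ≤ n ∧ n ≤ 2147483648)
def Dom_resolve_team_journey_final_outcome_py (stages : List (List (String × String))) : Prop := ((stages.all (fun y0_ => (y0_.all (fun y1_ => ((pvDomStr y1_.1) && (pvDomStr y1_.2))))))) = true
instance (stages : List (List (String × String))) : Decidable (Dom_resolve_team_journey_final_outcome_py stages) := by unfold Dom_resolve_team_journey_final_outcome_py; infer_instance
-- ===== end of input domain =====

-- B replaces A's two separate any-scans plus a trailing stages[-1] access by one
-- single pass tracking a runner_up flag and the last stage's result (objective: simpler).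


-- dict[str, Any] is the association list; first-match lookup (Python stage["stageResult"]; none = KeyError)
def pvLookup (st : List (String × String)) (k : String) : Option String :=
  (st.find? (fun p => p.1 == k)).map (·.2)

-- ===== PORT A =====
def resolve_team_journey_final_outcome_py (stages : List (List (String × String))) : String :=
  if stages.any (fun st => pvLookup st "stageResult" == some "champion") then "champion"
  else if stages.any (fun st => pvLookup st "stageResult" == some "runner_up") then "runner_up"
  else
    match stages.getLast? with
    | some st => (pvLookup st "stageResult").getD ""   -- key present under Pre_ (KeyError excluded)
    | none => "not_applicable"

-- ===== PORT B =====
-- single pass: ru = runner_up_seen, last = last stage result seen so far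
def pvGoB : List (List (String × String)) → Bool → String → String
  | [], ru, last => if ru then "runner_up" else last
  | st :: rest, ru, _ =>
    let r := (pvLookup st "stageResult").getD ""      -- key present under Pre_ (KeyError excluded)
    if r == "champion" then "champion"
    else pvGoB rest (ru || r == "runner_up") r

def resolve_team_journey_final_outcome_py_alt (stages : List (List (String × String))) : String :=
  pvGoB stages false "not_applicable"

-- ===== PRECONDITION & SPEC =====
-- Pre_ excludes exactly the inputs where Python A raises KeyError: a stage without the
-- "stageResult" key occurring before the first champion stage (B raises identically there).
def Pre_resolve_team_journey_final_outcome_py (stages : List (List (String × String))) : Prop :=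
  ∀ st ∈ stages.takeWhile (fun st => !(pvLookup st "stageResult" == some "champion")),
    (pvLookup st "stageResult").isSome = true
instance (stages : List (List (String × String))) : Decidable (Pre_resolve_team_journey_final_outcome_py stages) := by unfold Pre_resolve_team_journey_final_outcome_py; infer_instance

def pvWitness_resolve_team_journey_final_outcome_py : (List (List (String × String))) :=
  [[("stageResult", "group_stage")], [("stageResult", "runner_up")]]

def Spec_resolve_team_journey_final_outcome_py (stages : List (List (String × String))) (out : String) : Prop := out = resolve_team_journey_final_outcome_py_alt stages
instance (stages : List (List (String × String))) (out : String) : Decidable (Spec_resolve_team_journey_final_outcome_py stages out) := by unfold Spec_resolve_team_journey_final_outcome_py; infer_instance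

-- ===== CLAIM (what is proved, stated in full; the proofs are below) =====
def Claim_equal_resolve_team_journey_final_outcome_py : Prop := ∀ (stages : List (List (String × String))), Dom_resolve_team_journey_final_outcome_py stages → Pre_resolve_team_journey_final_outcome_py stages → Spec_resolve_team_journey_final_outcome_py stages (resolve_team_journey_final_outcome_py stages)

-- ===== LEMMAS AND PROOFS =====

-- if any stage is a champion, the single pass returns "champion"
theorem pvGoB_champion (l : List (List (String × String))) :
    ∀ ru last, l.any (fun st => pvLookup st "stageResult" == some "champion") = true →
      pvGoB l ru last = "champion" := by
  induction l with
  | nil => intro ru last h; simp at h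
  | cons st rest ih =>
    intro ru last h
    simp only [List.any_cons, Bool.or_eq_true] at h
    by_cases hc : (pvLookup st "stageResult" == some "champion") = true
    · simp [pvGoB, Option.getD, show pvLookup st "stageResult" = some "champion" from by
        simpa using hc]
    · have htail := h.resolve_left hc
      simp only [pvGoB]
      rw [if_neg (by
        rcases ho : pvLookup st "stageResult" with _ | v
        · simp
        · simp only [ho] at hc ⊢
          simpa using fun hv => hc (by simp [hv]))]
      exact ih _ _ htail

-- with no champion and all keys present, the single pass computes A's remaining branches
theorem pvGoB_no_champion (l : List (List (String × String)))
    (hnc : l.any (fun st => pvLookup st "stageResult" == some "champion") = false)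
    (hk : ∀ st ∈ l, (pvLookup st "stageResult").isSome = true) :
    ∀ ru last, pvGoB l ru last =
      if ru || l.any (fun st => pvLookup st "stageResult" == some "runner_up") then "runner_up"
      else match l.getLast? with
           | some st => (pvLookup st "stageResult").getD ""
           | none => last := by
  induction l with
  | nil => intro ru last; simp [pvGoB]
  | cons st rest ih =>
    intro ru last
    simp only [List.any_cons, Bool.or_eq_false_iff] at hnc
    obtain ⟨hc, hrest⟩ := hnc
    obtain ⟨v, hv⟩ := Option.isSome_iff_exists.mp (hk st (by simp))
    have hvne : v ≠ "champion" := by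
      intro h; rw [h] at hv; simp [hv] at hc
    simp only [pvGoB, hv, Option.getD_some]
    rw [if_neg (by simpa using hvne)]
    rw [ih hrest (fun s hs => hk s (by simp [hs]))]
    rcases rest with _ | ⟨st2, rest2⟩
    · simp [hv, List.getLast?]
    · have hgl : ((st :: st2 :: rest2).getLast?) = ((st2 :: rest2).getLast?) := by
        simp [List.getLast?_cons_cons]
      rcases hg : (st2 :: rest2).getLast? with _ | g
      · simp at hg
      · simp only [List.any_cons, hgl, hg, Bool.or_assoc]
        simp [hv]

theorem takeWhile_of_no_champion (l : List (List (String × String)))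
    (h : l.any (fun st => pvLookup st "stageResult" == some "champion") = false) :
    l.takeWhile (fun st => !(pvLookup st "stageResult" == some "champion")) = l := by
  apply List.takeWhile_eq_self_iff.mpr
  intro st hst
  have hf : (pvLookup st "stageResult" == some "champion") = false := by
    by_contra hne
    have hc := (Bool.not_eq_false _).mp hne
    have ha : l.any (fun st => pvLookup st "stageResult" == some "champion") = true :=
      List.any_eq_true.mpr ⟨st, hst, hc⟩
    rw [ha] at h; cases h
  simp [hf]

-- ===== VERDICT (by name: the statement is the Claim_ definition above) =====
theorem resolve_team_journey_final_outcome_py_spec : Claim_equal_resolve_team_journey_final_outcome_py := by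
  intro stages _ hpre
  unfold Spec_resolve_team_journey_final_outcome_py
  unfold resolve_team_journey_final_outcome_py resolve_team_journey_final_outcome_py_alt
  by_cases hc : stages.any (fun st => pvLookup st "stageResult" == some "champion") = true
  · rw [if_pos hc, pvGoB_champion stages false "not_applicable" hc]
  · have hc' : stages.any (fun st => pvLookup st "stageResult" == some "champion") = false :=
      eq_false_of_ne_true hc
    have hk : ∀ st ∈ stages, (pvLookup st "stageResult").isSome = true := by
      intro st hst
      exact hpre st (by rw [takeWhile_of_no_champion stages hc']; exact hst)
    rw [if_neg hc, pvGoB_no_champion stages hc' hk false "not_applicable", Bool.false_or]
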